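-- pv_equiv track=rewrite | github.com/ayukyo/alltoolkit | Python/swift_utils/mod.py | search_by_country
-- ===== SOURCE A (Python) =====
-- from typing import Optional, Dict, List, Tuple, Any
--
-- _BANK_EXAMPLES: Dict[str, Dict[str, Any]] = {
--     "BKCH": {"name": "中国银行", "name_en": "Bank of China", "country": "CN"},
--     "ICBK": {"name": "中国工商银行", "name_en": "Industrial and Commercial Bank of China", "country": "CN"},
--     "CITI": {"name": "花旗银行", "name_en": "Citibank", "country": "US"},
--     "HSBC": {"name": "汇丰银行", "name_en": "HSBC", "country": "GB"},
--     "BARC": {"name": "巴克莱银行", "name_en": "Barclays", "country": "GB"},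
--     "DEUT": {"name": "德意志银行", "name_en": "Deutsche Bank", "country": "DE"},
--     "BNPA": {"name": "法国巴黎银行", "name_en": "BNP Paribas", "country": "FR"},
--     "BOFA": {"name": "美国银行", "name_en": "Bank of America", "country": "US"},
--     "JPMO": {"name": "摩根大通", "name_en": "JPMorgan Chase", "country": "US"},
--     "ROYL": {"name": "苏格兰皇家银行", "name_en": "Royal Bank of Scotland", "country": "GB"},
--     "UBSW": {"name": "瑞银集团", "name_en": "UBS", "country": "CH"},
--     "MIDL": {"name": "渣打银行", "name_en": "Standard Chartered", "country": "GB"},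
--     "BOJP": {"name": "日本银行", "name_en": "Bank of Japan", "country": "JP"},
--     "MHBJ": {"name": "三菱日联银行", "name_en": "MUFG Bank", "country": "JP"},
--     "SANW": {"name": "桑坦德银行", "name_en": "Santander", "country": "ES"},
--     "NDEA": {"name": "北欧联合银行", "name_en": "Nordea", "country": "SE"},
--     "BOIT": {"name": "意大利银行", "name_en": "Bank of Italy", "country": "IT"},
--     "CAFR": {"name": "农业信贷银行", "name_en": "Crédit Agricole", "country": "FR"},
--     "KBNK": {"name": "韩国银行", "name_en": "Bank of Korea", "country": "KR"},
--     "SBIN": {"name": "印度国家银行", "name_en": "State Bank of India", "country": "IN"},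
-- }
--
-- def search_by_country(country_code: str) -> List[Dict[str, Any]]:
--     """
--     搜索指定国家的银行示例
--
--     Args:
--         country_code: 国家代码
--
--     Returns:
--         银行示例列表
--     """
--     country_code = country_code.strip().upper()
--
--     results = []
--     for bank_code, info in _BANK_EXAMPLES.items():
--         if info["country"] == country_code:
--             results.append({
--                 "bank_code": bank_code,
--                 "bank_name": info["name"],
--                 "bank_name_en": info["name_en"],
--                 "country": country_code,
--             })
--
--     return results
-- ===== SOURCE B (Python) =====
-- # Bank data kept as compact delimited rows, parsed once at import into a
-- # country-keyed index; the function is a direct bucket lookup, not a scan.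
-- _LINES = [
--     "BKCH|中国银行|Bank of China|CN",
--     "ICBK|中国工商银行|Industrial and Commercial Bank of China|CN",
--     "CITI|花旗银行|Citibank|US",
--     "HSBC|汇丰银行|HSBC|GB",
--     "BARC|巴克莱银行|Barclays|GB",
--     "DEUT|德意志银行|Deutsche Bank|DE",
--     "BNPA|法国巴黎银行|BNP Paribas|FR",
--     "BOFA|美国银行|Bank of America|US",
--     "JPMO|摩根大通|JPMorgan Chase|US",
--     "ROYL|苏格兰皇家银行|Royal Bank of Scotland|GB",
--     "UBSW|瑞银集团|UBS|CH",
--     "MIDL|渣打银行|Standard Chartered|GB",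
--     "BOJP|日本银行|Bank of Japan|JP",
--     "MHBJ|三菱日联银行|MUFG Bank|JP",
--     "SANW|桑坦德银行|Santander|ES",
--     "NDEA|北欧联合银行|Nordea|SE",
--     "BOIT|意大利银行|Bank of Italy|IT",
--     "CAFR|农业信贷银行|Crédit Agricole|FR",
--     "KBNK|韩国银行|Bank of Korea|KR",
--     "SBIN|印度国家银行|State Bank of India|IN",
-- ]
--
-- _BY_COUNTRY = {}
-- for _line in _LINES:
--     _code, _name, _name_en, _country = _line.split("|")
--     _BY_COUNTRY.setdefault(_country, []).append((_code, _name, _name_en))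
--
--
-- def search_by_country(country_code):
--     cc = country_code.strip().upper()
--     return [
--         {"bank_code": code, "bank_name": name, "bank_name_en": name_en, "country": cc}
--         for code, name, name_en in _BY_COUNTRY.get(cc, [])
--     ]
-- ===== Notes on version B (the rewrite author's own statement) =====
-- stated objective: alternative
-- what changed: The per-call scan-and-filter over a dict-of-dicts table is replaced by a compact delimited text block parsed once at import into a country-keyed index, so the function is a direct bucket lookup plus a fresh-dict comprehension instead of a conditional scan.
import Mathlib
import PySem

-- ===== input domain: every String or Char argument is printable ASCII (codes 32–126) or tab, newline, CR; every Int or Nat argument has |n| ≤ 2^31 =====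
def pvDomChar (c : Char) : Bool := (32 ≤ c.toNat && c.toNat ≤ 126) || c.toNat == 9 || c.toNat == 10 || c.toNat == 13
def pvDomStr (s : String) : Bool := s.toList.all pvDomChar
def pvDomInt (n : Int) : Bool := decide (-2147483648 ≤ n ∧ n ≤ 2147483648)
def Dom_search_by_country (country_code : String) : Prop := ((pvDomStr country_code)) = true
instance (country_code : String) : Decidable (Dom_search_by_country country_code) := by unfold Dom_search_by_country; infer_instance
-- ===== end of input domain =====

-- B stores the bank data as compact delimited rows parsed once at import into a
-- country-keyed index; the call is a bucket lookup, not A's scan (return value proved equal).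

-- ===== PORT A =====
-- _BANK_EXAMPLES as a list of (bank_code, (name, name_en, country)) in insertion order
def pvBankExamples : List (String × String × String × String) :=
  [("BKCH", "中国银行", "Bank of China", "CN"),
   ("ICBK", "中国工商银行", "Industrial and Commercial Bank of China", "CN"),
   ("CITI", "花旗银行", "Citibank", "US"),
   ("HSBC", "汇丰银行", "HSBC", "GB"),
   ("BARC", "巴克莱银行", "Barclays", "GB"),
   ("DEUT", "德意志银行", "Deutsche Bank", "DE"),
   ("BNPA", "法国巴黎银行", "BNP Paribas", "FR"),
   ("BOFA", "美国银行", "Bank of America", "US"),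
   ("JPMO", "摩根大通", "JPMorgan Chase", "US"),
   ("ROYL", "苏格兰皇家银行", "Royal Bank of Scotland", "GB"),
   ("UBSW", "瑞银集团", "UBS", "CH"),
   ("MIDL", "渣打银行", "Standard Chartered", "GB"),
   ("BOJP", "日本银行", "Bank of Japan", "JP"),
   ("MHBJ", "三菱日联银行", "MUFG Bank", "JP"),
   ("SANW", "桑坦德银行", "Santander", "ES"),
   ("NDEA", "北欧联合银行", "Nordea", "SE"),
   ("BOIT", "意大利银行", "Bank of Italy", "IT"),
   ("CAFR", "农业信贷银行", "Crédit Agricole", "FR"),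
   ("KBNK", "韩国银行", "Bank of Korea", "KR"),
   ("SBIN", "印度国家银行", "State Bank of India", "IN")]

def search_by_country (country_code : String) : List (List (String × String)) :=
  let cc := PySem.Str.upper (PySem.Str.strip country_code)
  pvBankExamples.foldl
    (fun results p =>
      if p.2.2.2 == cc then
        results ++ [[("bank_code", p.1), ("bank_name", p.2.1),
                     ("bank_name_en", p.2.2.1), ("country", cc)]]
      else results) []

-- ===== PORT B =====
-- Source B's _LINES: compact delimited rows
def pvLines : List String :=
  ["BKCH|中国银行|Bank of China|CN",
   "ICBK|中国工商银行|Industrial and Commercial Bank of China|CN",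
   "CITI|花旗银行|Citibank|US",
   "HSBC|汇丰银行|HSBC|GB",
   "BARC|巴克莱银行|Barclays|GB",
   "DEUT|德意志银行|Deutsche Bank|DE",
   "BNPA|法国巴黎银行|BNP Paribas|FR",
   "BOFA|美国银行|Bank of America|US",
   "JPMO|摩根大通|JPMorgan Chase|US",
   "ROYL|苏格兰皇家银行|Royal Bank of Scotland|GB",
   "UBSW|瑞银集团|UBS|CH",
   "MIDL|渣打银行|Standard Chartered|GB",
   "BOJP|日本银行|Bank of Japan|JP",
   "MHBJ|三菱日联银行|MUFG Bank|JP",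
   "SANW|桑坦德银行|Santander|ES",
   "NDEA|北欧联合银行|Nordea|SE",
   "BOIT|意大利银行|Bank of Italy|IT",
   "CAFR|农业信贷银行|Crédit Agricole|FR",
   "KBNK|韩国银行|Bank of Korea|KR",
   "SBIN|印度国家银行|State Bank of India|IN"]

-- the 4-way tuple unpack 'code, name, name_en, country = line.split("|")';
-- every row has exactly three '|', so the default branch is unreachable
def pvParseLine (line : String) : String × String × String × String :=
  match PySem.Str.split? line "|" with
  | some [code, name, name_en, country] => (code, name, name_en, country)
  | _ => ("", "", "", "")

-- _BY_COUNTRY: the module-scope parse loop (setdefault+append ≙ Dict.modify with default [])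
def pvByCountry : PySem.Dict String (List (String × String × String)) :=
  pvLines.foldl
    (fun d line =>
      let p := pvParseLine line
      d.modify p.2.2.2 [] (· ++ [(p.1, p.2.1, p.2.2.1)]))
    PySem.Dict.empty

def search_by_country_alt (country_code : String) : List (List (String × String)) :=
  let cc := PySem.Str.upper (PySem.Str.strip country_code)
  (pvByCountry.getD cc []).map
    (fun t => [("bank_code", t.1), ("bank_name", t.2.1),
               ("bank_name_en", t.2.2), ("country", cc)])

-- ===== PRECONDITION & SPEC =====
def Spec_search_by_country (country_code : String) (out : List (List (String × String))) : Prop := out = search_by_country_alt country_code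
instance (country_code : String) (out : List (List (String × String))) : Decidable (Spec_search_by_country country_code out) := by unfold Spec_search_by_country; infer_instance

-- ===== CLAIM (what is proved, stated in full; the proofs are below) =====
def Claim_equal_search_by_country : Prop := ∀ (country_code : String), Dom_search_by_country country_code → Spec_search_by_country country_code (search_by_country country_code)

-- ===== LEMMAS AND PROOFS =====

-- B's parse loop, evaluated once: splitlines+split reproduce A's table row for row
set_option maxRecDepth 10000 in
theorem pvParsed_eq : pvLines.map pvParseLine = pvBankExamples := by
  decide

-- A's loop: append-if-matching over any list, any accumulator
theorem pvA_fold (cc : String) (l : List (String × String × String × String))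
    (acc : List (List (String × String))) :
    l.foldl
      (fun results p =>
        if p.2.2.2 == cc then
          results ++ [[("bank_code", p.1), ("bank_name", p.2.1),
                       ("bank_name_en", p.2.2.1), ("country", cc)]]
        else results) acc =
    acc ++ (l.filter (fun p => p.2.2.2 == cc)).map
      (fun p => [("bank_code", p.1), ("bank_name", p.2.1),
                 ("bank_name_en", p.2.2.1), ("country", cc)]) := by
  induction l generalizing acc with
  | nil => simp
  | cons x xs ih =>
    rw [List.foldl_cons, ih]
    by_cases h : (x.2.2.2 == cc) = true
    · simp [h]
    · simp at h
      simp [h]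

-- B's index loop: the bucket of cc after folding any row list into any dict
theorem pvB_fold (cc : String) (l : List (String × String × String × String))
    (d : PySem.Dict String (List (String × String × String))) :
    ((l.foldl
        (fun d p => d.modify p.2.2.2 [] (· ++ [(p.1, p.2.1, p.2.2.1)])) d).getD cc []) =
    d.getD cc [] ++ (l.filter (fun p => p.2.2.2 == cc)).map
      (fun p => (p.1, p.2.1, p.2.2.1)) := by
  induction l generalizing d with
  | nil => simp
  | cons x xs ih =>
    rw [List.foldl_cons, ih, PySem.Dict.getD_modify]
    by_cases h : cc = x.2.2.2
    · simp [h]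
    · have hb : (x.2.2.2 == cc) = false := beq_eq_false_iff_ne.mpr (fun e => h e.symm)
      simp [h, hb]

theorem search_by_country_eq (country_code : String) :
    search_by_country country_code = search_by_country_alt country_code := by
  simp only [search_by_country, search_by_country_alt, pvByCountry]
  rw [show pvLines.foldl
        (fun d line =>
          let p := pvParseLine line
          d.modify p.2.2.2 [] (· ++ [(p.1, p.2.1, p.2.2.1)]))
        PySem.Dict.empty =
      pvBankExamples.foldl
        (fun d p => d.modify p.2.2.2 [] (· ++ [(p.1, p.2.1, p.2.2.1)]))
        PySem.Dict.empty by
    rw [← pvParsed_eq, List.foldl_map]]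
  rw [pvA_fold, pvB_fold]
  simp [List.map_map, Function.comp_def]

-- ===== VERDICT (by name: the statement is the Claim_ definition above) =====
theorem search_by_country_spec : Claim_equal_search_by_country := by
  intro cc _
  exact search_by_country_eq cc
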